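-- pv_equiv track=rewrite | github.com/seaotterie/Grant_Automation | tools/xml-990pf-parser-tool/app/xml_990pf_parser.py | normalize_org_name
-- ===== SOURCE A (Python) =====
-- def normalize_org_name(name: str) -> str:
--     """
--     Normalize organization name for network matching.
--
--     Examples:
--         "Boys and Girls Club of Fauquier" → "BOYS AND GIRLS CLUB OF FAUQUIER"
--         "4P FOODS INC" → "4P FOODS INC"
--         "AFRO-AMERICAN HISTORICAL ASSOC" → "AFROAMERICAN HISTORICAL ASSOC"
--
--     Returns:
--         Cleaned uppercase org name
--     """
--     if not name:
--         return ""
--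
--     # Remove common legal suffixes (but preserve for matching accuracy)
--     cleaned = name
--
--     # Remove punctuation (except spaces)
--     for char in ['.', ',', ';', ':', '(', ')']:
--         cleaned = cleaned.replace(char, '')
--
--     # Normalize hyphens to spaces
--     cleaned = cleaned.replace('-', ' ')
--
--     # Normalize whitespace and uppercase
--     cleaned = ' '.join(cleaned.split()).upper()
--
--     return cleaned
-- ===== SOURCE B (Python) =====
-- def normalize_org_name(name: str) -> str:
--     if not name:
--         return ""
--     tokens = []
--     buf = []
--     for ch in name:
--         if ch in ('.', ',', ';', ':', '(', ')'):
--             continue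
--         if ch.isspace() or ch == '-':
--             if buf:
--                 tokens.append(''.join(buf))
--                 buf = []
--         else:
--             buf.append(ch.upper())
--     if buf:
--         tokens.append(''.join(buf))
--     return ' '.join(tokens)
-- ===== Notes on version B (the rewrite author's own statement) =====
-- stated objective: simpler
-- what changed: Replaces A's six punctuation replace passes plus a hyphen pass plus split/join/upper (each rescanning the whole string) by one pass over the characters maintaining a token list and a current-token buffer: punctuation is dropped, separators (whitespace or hyphen) flush the buffer, other characters are uppercased and appended.
import Mathlib
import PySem

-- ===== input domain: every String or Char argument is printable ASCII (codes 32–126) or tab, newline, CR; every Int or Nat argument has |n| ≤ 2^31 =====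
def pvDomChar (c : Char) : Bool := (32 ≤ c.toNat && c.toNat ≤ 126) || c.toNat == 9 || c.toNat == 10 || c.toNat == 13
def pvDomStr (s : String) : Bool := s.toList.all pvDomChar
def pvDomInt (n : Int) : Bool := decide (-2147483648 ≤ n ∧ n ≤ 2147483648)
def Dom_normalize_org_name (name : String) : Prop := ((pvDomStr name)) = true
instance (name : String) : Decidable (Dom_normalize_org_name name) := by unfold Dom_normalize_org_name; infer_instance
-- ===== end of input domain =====

-- B replaces A's several replace passes plus split/join by one pass over the characters
-- (punctuation dropped, separators flush a token buffer, letters uppercased): objective 'simpler'.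

-- ===== PORT A =====
def normalize_org_name (name : String) : String :=
  if name = "" then ""
  else
    -- for char in ['.', ',', ';', ':', '(', ')']: cleaned = cleaned.replace(char, '')
    let cleaned := ['.', ',', ';', ':', '(', ')'].foldl
      (fun s ch => PySem.Str.replace s (String.ofList [ch]) "") name
    -- cleaned = cleaned.replace('-', ' ')
    let cleaned := PySem.Str.replace cleaned "-" " "
    -- ' '.join(cleaned.split()).upper()
    PySem.Str.upper (PySem.Str.join " " (PySem.Str.split₀ cleaned))

-- ===== PORT B =====
-- state: (finished tokens, current token buffer)
def pvBStep (st : List (List Char) × List Char) (ch : Char) : List (List Char) × List Char :=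
  if ch ∈ ['.', ',', ';', ':', '(', ')'] then st
  else if PySem.Chars.isspace ch || ch == '-' then
    if st.2.isEmpty then st else (st.1 ++ [st.2], [])
  else (st.1, st.2 ++ [PySem.Chars.upperChar ch])

def normalize_org_name_alt (name : String) : String :=
  if name = "" then ""
  else
    let st := name.toList.foldl pvBStep ([], [])
    let toks := if st.2.isEmpty then st.1 else st.1 ++ [st.2]
    String.ofList (PySem.Chars.join [' '] toks)

-- ===== PRECONDITION & SPEC =====
def Spec_normalize_org_name (name : String) (out : String) : Prop := out = normalize_org_name_alt name
instance (name : String) (out : String) : Decidable (Spec_normalize_org_name name out) := by unfold Spec_normalize_org_name; infer_instance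

-- ===== CLAIM (what is proved, stated in full; the proofs are below) =====
def Claim_equal_normalize_org_name : Prop := ∀ (name : String), Dom_normalize_org_name name → Spec_normalize_org_name name (normalize_org_name name)

-- ===== LEMMAS AND PROOFS =====

-- predicate kept by A's six punctuation-removing replace passes
def pvKeep (c : Char) : Bool := !(decide (c ∈ ['.', ',', ';', ':', '(', ')']))
-- A's '-' → ' ' substitution, per character
def pvSub (c : Char) : Char := if c == '-' then ' ' else c
-- B's finalisation: flush a non-empty buffer
def pvFinish (st : List (List Char) × List Char) : List (List Char) :=
  if st.2.isEmpty then st.1 else st.1 ++ [st.2]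

-- s.replace(o, '') for a single char o is a filter
theorem pv_replace_empty_go (o : Char) :
    ∀ (fuel : Nat) (l acc : List Char), l.length ≤ fuel →
      PySem.Chars.replace.go [o] [] fuel l acc
        = acc.reverse ++ l.filter (fun c => !(c == o)) := by
  intro fuel
  induction fuel with
  | zero => intro l acc h; cases l with
    | nil => simp [PySem.Chars.replace.go]
    | cons c t => simp at h
  | succ n ih =>
    intro l acc h
    cases l with
    | nil => simp [PySem.Chars.replace.go]
    | cons c t =>
      simp only [PySem.Chars.replace.go, List.isPrefixOf, List.filter]
      by_cases hc : c = o
      · simp [hc, ih t acc (by simpa using h)]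
      · have hb : (o == c) = false := by simp; exact fun h' => hc h'.symm
        have hb' : (c == o) = false := by simp [hc]
        simp [hb, hb', ih t (c :: acc) (by simpa using h)]

theorem pv_replace_empty (o : Char) (s : List Char) :
    PySem.Chars.replace s [o] [] = s.filter (fun c => !(c == o)) := by
  simp [PySem.Chars.replace, pv_replace_empty_go o s.length s [] le_rfl]

-- s.replace(o, n) for single chars is a map
theorem pv_replace_sub_go (o n' : Char) :
    ∀ (fuel : Nat) (l acc : List Char), l.length ≤ fuel →
      PySem.Chars.replace.go [o] [n'] fuel l acc
        = acc.reverse ++ l.map (fun c => if c == o then n' else c) := by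
  intro fuel
  induction fuel with
  | zero => intro l acc h; cases l with
    | nil => simp [PySem.Chars.replace.go]
    | cons c t => simp at h
  | succ n ih =>
    intro l acc h
    cases l with
    | nil => simp [PySem.Chars.replace.go]
    | cons c t =>
      simp only [PySem.Chars.replace.go, List.isPrefixOf, List.map]
      by_cases hc : c = o
      · simp [hc, ih t (n' :: acc) (by simpa using h)]
      · have hb : (o == c) = false := by simp; exact fun h' => hc h'.symm
        have hb' : (c == o) = false := by simp [hc]
        simp [hb, hb', ih t (c :: acc) (by simpa using h)]

theorem pv_replace_sub (o n' : Char) (s : List Char) :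
    PySem.Chars.replace s [o] [n'] = s.map (fun c => if c == o then n' else c) := by
  simp [PySem.Chars.replace, pv_replace_sub_go o n' s.length s [] le_rfl]

-- upper distributes over ' '-join (since ' '.upper() = ' ')
theorem pv_upper_join (ps : List (List Char)) :
    PySem.Chars.upper (PySem.Chars.join [' '] ps)
      = PySem.Chars.join [' '] (ps.map PySem.Chars.upper) := by
  induction ps with
  | nil => simp [PySem.Chars.join, PySem.Chars.upper, List.intercalate]
  | cons x tl ih =>
    cases tl with
    | nil => simp [PySem.Chars.join, PySem.Chars.upper, List.intercalate]
    | cons y zs =>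
      have e1 : PySem.Chars.join [' '] (x :: y :: zs)
          = x ++ [' '] ++ PySem.Chars.join [' '] (y :: zs) := by
        simp [PySem.Chars.join, List.intercalate]
      have e2 : PySem.Chars.join [' '] (PySem.Chars.upper x :: PySem.Chars.upper y :: zs.map PySem.Chars.upper)
          = PySem.Chars.upper x ++ [' '] ++ PySem.Chars.join [' '] (PySem.Chars.upper y :: zs.map PySem.Chars.upper) := by
        simp [PySem.Chars.join, List.intercalate]
      have hsp : PySem.Chars.upperChar ' ' = ' ' := by decide
      have ih' : PySem.Chars.join [' '] (PySem.Chars.upper y :: zs.map PySem.Chars.upper)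
          = PySem.Chars.upper (PySem.Chars.join [' '] (y :: zs)) := by
        simpa using ih.symm
      simp only [List.map_cons]
      rw [e1, e2, ih']
      simp [PySem.Chars.upper, hsp]

-- pvSub turns exactly the separators (whitespace or '-') into whitespace
theorem pv_isspace_sub (c : Char) :
    PySem.Chars.isspace (pvSub c) = (PySem.Chars.isspace c || c == '-') := by
  by_cases h : c = '-'
  · simp [pvSub, h]; decide
  · have : (c == '-') = false := by simp [h]
    simp [pvSub, this]

-- MAIN INVARIANT: A's split₀ scan over the cleaned characters, uppercased,
-- is B's token/buffer fold over the raw characters.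
theorem pv_main :
    ∀ (l cur : List Char) (acc : List (List Char)),
      (PySem.Chars.split₀.go ((l.filter pvKeep).map pvSub) cur acc).map PySem.Chars.upper
        = pvFinish (l.foldl pvBStep ((acc.reverse).map PySem.Chars.upper,
            PySem.Chars.upper cur.reverse)) := by
  intro l
  induction l with
  | nil =>
    intro cur acc
    cases cur with
    | nil => simp [PySem.Chars.split₀.go, pvFinish, PySem.Chars.upper]
    | cons c cs =>
      simp [PySem.Chars.split₀.go, pvFinish, PySem.Chars.upper]
  | cons c l ih =>
    intro cur acc
    by_cases hk : pvKeep c = true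
    · -- c survives A's punctuation filter and is not skipped by B
      have hmem : ¬ (c ∈ ['.', ',', ';', ':', '(', ')']) := by
        simp only [pvKeep, Bool.not_eq_eq_eq_not, Bool.not_true, decide_eq_false_iff_not] at hk
        exact hk
      by_cases hs : (PySem.Chars.isspace c || c == '-') = true
      · -- separator: A's cleaned char is whitespace, B flushes the buffer
        have hs' : PySem.Chars.isspace (pvSub c) = true := by rw [pv_isspace_sub]; exact hs
        cases cur with
        | nil =>
          simp only [List.filter_cons, hk, if_pos, List.map_cons, PySem.Chars.split₀.go, hs',
            List.isEmpty_nil, List.foldl_cons, pvBStep, hmem, hs, if_false,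
            List.reverse_nil, PySem.Chars.upper, List.map_nil]
          simpa [PySem.Chars.upper] using ih [] acc
        | cons d ds =>
          simp only [List.filter_cons, hk, if_pos, List.map_cons, PySem.Chars.split₀.go, hs',
            List.isEmpty_cons, List.foldl_cons, pvBStep, hmem, hs, if_false]
          have h2 := ih [] ((d :: ds).reverse :: acc)
          simp only [List.reverse_cons, List.map_append, List.map_cons, List.map_nil,
            List.reverse_nil] at h2 ⊢
          simpa [PySem.Chars.upper] using h2
      · -- ordinary character: A keeps it verbatim, B appends its uppercase to the buffer
        have hs' : PySem.Chars.isspace (pvSub c) = false := by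
          rw [pv_isspace_sub]; simpa using hs
        have hnd : (c == '-') = false := by
          cases hcd : (c == '-') with
          | false => rfl
          | true => simp [hcd] at hs
        have hsub : pvSub c = c := by simp [pvSub, hnd]
        have hs'' : PySem.Chars.isspace c = false := by rw [← hsub]; exact hs'
        simp only [List.filter_cons, hk, if_pos, List.map_cons, hsub, PySem.Chars.split₀.go, hs'',
          Bool.false_eq_true, if_false, List.foldl_cons, pvBStep, hmem, hnd]
        have h2 := ih (c :: cur) acc
        simpa [PySem.Chars.upper] using h2
    · -- punctuation: dropped by A's filter and skipped by B
      have hmem : c ∈ ['.', ',', ';', ':', '(', ')'] := by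
        by_contra hmm
        exact hk (by simp [pvKeep, hmm])
      simp only [List.filter_cons, hk, Bool.false_eq_true, if_false, List.foldl_cons,
        pvBStep, if_pos hmem]
      exact ih cur acc

-- A's six replace passes compose to one filter with pvKeep
theorem pv_chain (cs : List Char) :
    ((((((cs.filter (fun c => !(c == '.'))).filter (fun c => !(c == ','))).filter
        (fun c => !(c == ';'))).filter (fun c => !(c == ':'))).filter
        (fun c => !(c == '('))).filter (fun c => !(c == ')')))
      = cs.filter pvKeep := by
  simp only [List.filter_filter]
  apply List.filter_congr
  intro c _
  by_cases h1 : c = '.' <;> by_cases h2 : c = ',' <;> by_cases h3 : c = ';' <;>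
    by_cases h4 : c = ':' <;> by_cases h5 : c = '(' <;> by_cases h6 : c = ')' <;>
    simp_all [pvKeep]

-- ===== VERDICT (by name: the statement is the Claim_ definition above) =====
theorem normalize_org_name_spec : Claim_equal_normalize_org_name := by
  intro name _
  unfold Spec_normalize_org_name normalize_org_name normalize_org_name_alt
  by_cases h : name = ""
  · simp [h]
  · simp only [h, if_false]
    apply String.toList_inj.mp
    simp only [List.foldl_cons, List.foldl_nil]
    rw [PySem.Str.toList_upper, PySem.Str.toList_join, PySem.Str.split₀_map_toList]
    simp only [PySem.Str.toList_replace, String.toList_ofList]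
    have e0 : ("".toList : List Char) = [] := rfl
    have e1 : (" ".toList : List Char) = [' '] := rfl
    have e2 : ("-".toList : List Char) = ['-'] := rfl
    rw [e0, e1, e2]
    rw [pv_replace_empty, pv_replace_empty, pv_replace_empty, pv_replace_empty,
      pv_replace_empty, pv_replace_empty, pv_chain, pv_replace_sub]
    have esub : (fun c => if c == '-' then ' ' else c) = pvSub := rfl
    rw [esub]
    have em := pv_main name.toList [] []
    have hu : PySem.Chars.upper ([] : List Char) = [] := rfl
    simp only [List.reverse_nil, List.map_nil, hu] at em
    rw [show PySem.Chars.split₀ ((name.toList.filter pvKeep).map pvSub)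
          = PySem.Chars.split₀.go ((name.toList.filter pvKeep).map pvSub) [] [] from rfl]
    rw [pv_upper_join, em]
    rfl
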